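-- pv_equiv track=rewrite | github.com/samcharles93/mantle | scripts/compare_model_specs.py | pick_recurrent_layer_index
-- ===== SOURCE A (Python) =====
-- def pick_recurrent_layer_index(names, layer_types):
--     if not layer_types:
--         return 0
--     max_check = min(len(layer_types), 128)
--     prefixes = ["model.layers.", "model.language_model.layers.", "language_model.model.layers."]
--     for i in range(max_check):
--         for p in prefixes:
--             prefix = f"{p}{i}."
--             if any(n.startswith(prefix + "linear_attn.") or n.startswith(prefix + "conv.") for n in names):
--                 return i
--     return 0
-- ===== SOURCE B (Python) =====
-- _PREFIXES = ("model.layers.", "model.language_model.layers.", "language_model.model.layers.")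
--
--
-- def _layer_index(name, max_check):
--     """Parse `name` as <prefix><canonical decimal idx>.linear_attn./conv. ...; return idx (< max_check) or None."""
--     for p in _PREFIXES:
--         if name.startswith(p):
--             rest = name[len(p):]
--             k = 0
--             idx = 0
--             while k < len(rest) and rest[k].isdigit():
--                 idx = idx * 10 + (ord(rest[k]) - 48)
--                 k += 1
--             if k == 0 or (rest[0] == '0' and k > 1):
--                 return None
--             tail = rest[k:]
--             if idx < max_check and (tail.startswith(".linear_attn.") or tail.startswith(".conv.")):
--                 return idx
--             return None
--     return None
--
--
-- def pick_recurrent_layer_index(names, layer_types):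
--     if not layer_types:
--         return 0
--     max_check = min(len(layer_types), 128)
--     best = None
--     for n in names:
--         idx = _layer_index(n, max_check)
--         if idx is not None and (best is None or idx < best):
--             best = idx
--     return best if best is not None else 0
-- ===== Notes on version B (the rewrite author's own statement) =====
-- stated objective: faster
-- what changed: Instead of scanning candidate indices 0..min(len(layer_types),128) and testing every prefix+index against all names, B makes one pass over names, parses each name's canonical decimal layer index after a matching prefix, and returns the minimum parsed index below the cap.
import Mathlib
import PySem

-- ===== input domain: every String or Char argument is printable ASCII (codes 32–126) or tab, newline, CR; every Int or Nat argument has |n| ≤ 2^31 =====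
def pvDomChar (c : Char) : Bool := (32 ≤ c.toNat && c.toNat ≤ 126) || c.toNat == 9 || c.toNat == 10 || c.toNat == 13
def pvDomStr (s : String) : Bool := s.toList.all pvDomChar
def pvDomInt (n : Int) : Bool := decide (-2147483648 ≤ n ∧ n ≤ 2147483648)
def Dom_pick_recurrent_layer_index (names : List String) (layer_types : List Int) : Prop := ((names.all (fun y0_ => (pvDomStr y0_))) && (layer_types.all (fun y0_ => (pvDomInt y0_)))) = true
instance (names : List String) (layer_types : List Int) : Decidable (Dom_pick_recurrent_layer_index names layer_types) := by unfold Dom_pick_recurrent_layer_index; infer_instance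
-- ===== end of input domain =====

-- B replaces A's scan over candidate indices 0..min(len(layer_types),128)-1 (each tested against
-- every name and prefix) by a single pass over the names that parses each name's layer index and
-- returns the minimum parsed index; the return values agree on all inputs.

def pvPrefixes : List String := ["model.layers.", "model.language_model.layers.", "language_model.model.layers."]

-- ===== PORT A =====
-- any(n.startswith(prefix + "linear_attn.") or n.startswith(prefix + "conv.") for n in names)
def pvCondA (names : List String) (pfx : String) : Bool :=
  names.any (fun n =>
    PySem.Str.startswith n (pfx ++ "linear_attn.") || PySem.Str.startswith n (pfx ++ "conv."))

-- the "for i in range(max_check): for p in prefixes: … return i" loop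
def pvPickALoop (names : List String) : List Int → Int
  | [] => 0
  | i :: is =>
    if pvPrefixes.any (fun p => pvCondA names (p ++ PySem.Int.toStr i ++ ".")) then i
    else pvPickALoop names is

def pick_recurrent_layer_index (names : List String) (layer_types : List Int) : Int :=
  if layer_types.isEmpty then 0
  else pvPickALoop names (PySem.List.pyRange 0 (min (PySem.List.len layer_types) 128) 1)

-- ===== PORT B =====
-- "while k < len(rest) and rest[k].isdigit(): idx = idx*10 + (ord(rest[k]) - 48); k += 1"
def pvScan : List Char → Nat → Int → Nat × Int
  | [], k, idx => (k, idx)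
  | c :: cs, k, idx =>
    if PySem.Chars.isdigit c then pvScan cs (k + 1) (idx * 10 + ((c.toNat : Int) - 48))
    else (k, idx)

-- body of _layer_index once name.startswith(p) holds
def pvParse (name p : String) (max_check : Int) : Option Int :=
  let rest := PySem.Str.slice name (some (PySem.Str.len p)) none
  let s := pvScan rest.toList 0 0
  if s.1 = 0 ∨ (PySem.Str.pyGet? rest 0 = some '0' ∧ 1 < s.1) then none
  else
    let tail := PySem.Str.slice rest (some (s.1 : Int)) none
    if s.2 < max_check ∧
        (PySem.Str.startswith tail ".linear_attn." = true ∨ PySem.Str.startswith tail ".conv." = true)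
    then some s.2
    else none

-- _layer_index: "for p in _PREFIXES: if name.startswith(p): … ; return None"
def pvLayerIndexLoop (name : String) (max_check : Int) : List String → Option Int
  | [] => none
  | p :: ps =>
    if PySem.Str.startswith name p then pvParse name p max_check
    else pvLayerIndexLoop name max_check ps

def pick_recurrent_layer_index_alt (names : List String) (layer_types : List Int) : Int :=
  if layer_types.isEmpty then 0
  else
    let max_check := min (PySem.List.len layer_types) 128
    let best := names.foldl (fun best n =>
      match pvLayerIndexLoop n max_check pvPrefixes with
      | some idx =>
        match best with
        | none => some idx
        | some b => if idx < b then some idx else some b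
      | none => best) (none : Option Int)
    match best with
    | some b => b
    | none => 0

-- ===== PRECONDITION & SPEC =====
def Spec_pick_recurrent_layer_index (names : List String) (layer_types : List Int) (out : Int) : Prop := out = pick_recurrent_layer_index_alt names layer_types
instance (names : List String) (layer_types : List Int) (out : Int) : Decidable (Spec_pick_recurrent_layer_index names layer_types out) := by unfold Spec_pick_recurrent_layer_index; infer_instance

-- ===== CLAIM (what is proved, stated in full; the proofs are below) =====
def Claim_equal_pick_recurrent_layer_index : Prop := ∀ (names : List String) (layer_types : List Int), Dom_pick_recurrent_layer_index names layer_types → Spec_pick_recurrent_layer_index names layer_types (pick_recurrent_layer_index names layer_types)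

-- ===== LEMMAS AND PROOFS =====

-- canonical decimal-digit-string toolkit
def pvDval (c : Char) : Nat := c.toNat - 48
def pvNatVal (t : List Char) : Nat := t.foldl (fun a c => a * 10 + pvDval c) 0
def pvGoodB (t : List Char) : Bool :=
  !t.isEmpty && t.all PySem.Chars.isdigit && (t.headD ' ' != '0' || t.length == 1)
def pvGood (t : List Char) : Prop :=
  t ≠ [] ∧ (∀ c ∈ t, PySem.Chars.isdigit c = true) ∧ (t.headD ' ' ≠ '0' ∨ t.length = 1)


theorem pvGoodB_iff (t : List Char) : pvGoodB t = true ↔ pvGood t := by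
  simp [pvGoodB, pvGood, List.isEmpty_iff, List.all_eq_true, and_assoc]

theorem pv_fold_eq (t : List Char) : ∀ a : Nat,
    t.foldl (fun a c => a * 10 + pvDval c) a = a * 10 ^ t.length + Nat.ofDigits 10 (t.map pvDval).reverse := by
  induction t with
  | nil => intro a; simp
  | cons c t ih =>
    intro a
    simp only [List.foldl_cons, List.map_cons, List.reverse_cons, List.length_cons, ih,
      Nat.ofDigits_append, Nat.ofDigits_singleton, List.length_reverse, List.length_map]
    ring

theorem pv_natVal_eq (t : List Char) :
    pvNatVal t = Nat.ofDigits 10 (t.map pvDval).reverse := by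
  simpa using pv_fold_eq t 0

theorem pv_isdigit_iff (c : Char) : PySem.Chars.isdigit c = true ↔ 48 ≤ c.toNat ∧ c.toNat ≤ 57 := by
  simp only [PySem.Chars.isdigit, Bool.and_eq_true, decide_eq_true_eq, Char.le_def, Char.toNat]
  constructor
  · rintro ⟨h1, h2⟩; exact ⟨h1, h2⟩
  · rintro ⟨h1, h2⟩; exact ⟨h1, h2⟩

theorem pv_good_rep (t : List Char) (hg : pvGood t) (hne : t ≠ ['0']) :
    Nat.digits 10 (pvNatVal t) = (t.map pvDval).reverse := by
  obtain ⟨h0, hd, hcan⟩ := hg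
  rw [pv_natVal_eq]
  apply Nat.digits_ofDigits 10 (by norm_num)
  · intro l hl
    simp only [List.mem_reverse, List.mem_map] at hl
    obtain ⟨c, hc, rfl⟩ := hl
    have := (pv_isdigit_iff c).mp (hd c hc)
    unfold pvDval; omega
  · intro h
    -- getLast of reverse = head of map
    obtain ⟨c, t', rfl⟩ := List.exists_cons_of_ne_nil h0
    have hh : ((c :: t').map pvDval).reverse.getLast h = pvDval c := by
      simp [List.getLast_reverse]
    rw [hh]
    have hdc := (pv_isdigit_iff c).mp (hd c (by simp))
    have hc0 : c ≠ '0' := by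
      rcases hcan with h1 | h1
      · simpa using h1
      · -- length 1: t = [c]; c = '0' would make t = ['0']
        intro hc; apply hne
        simp only [List.length_cons, Nat.add_eq_right, List.length_eq_zero_iff] at h1
        simp [hc, h1]
    have : c.toNat ≠ 48 := by
      intro hc; apply hc0
      have : Char.ofNat c.toNat = Char.ofNat 48 := by rw [hc]
      simpa [Char.ofNat_toNat] using this
    unfold pvDval; omega

theorem pv_char_rec (t : List Char) (hd : ∀ c ∈ t, PySem.Chars.isdigit c = true) :
    t = (t.map pvDval).map (fun d => Char.ofNat (d + 48)) := by
  induction t with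
  | nil => rfl
  | cons c t ih =>
    have hc := (pv_isdigit_iff c).mp (hd c (by simp))
    have : Char.ofNat (pvDval c + 48) = c := by
      have : pvDval c + 48 = c.toNat := by unfold pvDval; omega
      rw [this, Char.ofNat_toNat]
    simp only [List.map_cons, this]
    exact congrArg _ (ih (fun c hcm => hd c (by simp [hcm])))

theorem pv_natVal_zero (t : List Char) (hg : pvGood t) (h : pvNatVal t = 0) : t = ['0'] := by
  by_contra hne
  have := pv_good_rep t hg hne
  rw [h] at this
  simp only [Nat.digits_zero] at this
  obtain ⟨h0, -, -⟩ := hg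
  obtain ⟨c, t', rfl⟩ := List.exists_cons_of_ne_nil h0
  simp at this

theorem pv_good_inj (t t' : List Char) (hg : pvGood t) (hg' : pvGood t')
    (h : pvNatVal t = pvNatVal t') : t = t' := by
  by_cases h1 : t = ['0']
  · subst h1
    have h0 : pvNatVal t' = 0 := by rw [← h]; decide
    exact (pv_natVal_zero t' hg' h0).symm
  · by_cases h2 : t' = ['0']
    · subst h2
      have h0 : pvNatVal t = 0 := by rw [h]; decide
      exact absurd (pv_natVal_zero t hg h0) h1
    · have e1 := pv_good_rep t hg h1
      have e2 := pv_good_rep t' hg' h2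
      rw [h, e2] at e1
      have e3 : t.map pvDval = t'.map pvDval := List.reverse_injective e1.symm
      rw [pv_char_rec t hg.2.1, pv_char_rec t' hg'.2.1, e3]

set_option maxRecDepth 4000 in
theorem pv_toChars_good_aux : ((List.range 128).all (fun v =>
    pvGoodB (PySem.Int.toChars (v : Int)) && (pvNatVal (PySem.Int.toChars (v : Int)) == v))) = true := by
  decide

theorem pv_toChars_good (v : Nat) (hv : v < 128) :
    pvGood (PySem.Int.toChars (v : Int)) ∧ pvNatVal (PySem.Int.toChars (v : Int)) = v := by
  have h := List.all_eq_true.mp pv_toChars_good_aux v (List.mem_range.mpr hv)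
  simp only [Bool.and_eq_true, beq_iff_eq, pvGoodB_iff] at h
  exact h

theorem pv_canon (t : List Char) (hg : pvGood t) (hlt : pvNatVal t < 128) :
    t = PySem.Int.toChars ((pvNatVal t : Nat) : Int) := by
  obtain ⟨hg2, he⟩ := pv_toChars_good (pvNatVal t) hlt
  exact pv_good_inj t _ hg hg2 he.symm


theorem pv_scan_eq (cs : List Char) : ∀ (k : Nat) (a : Int),
    pvScan cs k a = (k + (cs.takeWhile PySem.Chars.isdigit).length,
      (cs.takeWhile PySem.Chars.isdigit).foldl (fun a c => a * 10 + ((c.toNat : Int) - 48)) a) := by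
  induction cs with
  | nil => intro k a; simp [pvScan]
  | cons c cs ih =>
    intro k a
    by_cases h : PySem.Chars.isdigit c = true
    · simp [pvScan, h, List.takeWhile_cons, ih]; omega
    · simp only [Bool.not_eq_true] at h
      simp [pvScan, h, List.takeWhile_cons]

theorem pv_foldInt_eq (t : List Char) (hd : ∀ c ∈ t, PySem.Chars.isdigit c = true) :
    t.foldl (fun a c => a * 10 + ((c.toNat : Int) - 48)) 0 = ((pvNatVal t : Nat) : Int) := by
  suffices h : ∀ a : Nat, t.foldl (fun acc c => acc * 10 + ((c.toNat : Int) - 48)) (a : Int)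
      = ((t.foldl (fun acc c => acc * 10 + pvDval c) a : Nat) : Int) by
    simpa using h 0
  induction t with
  | nil => intro a; simp
  | cons c t ih =>
    intro a
    have hc := (pv_isdigit_iff c).mp (hd c (by simp))
    have : (a : Int) * 10 + ((c.toNat : Int) - 48) = ((a * 10 + pvDval c : Nat) : Int) := by
      unfold pvDval; push_cast; omega
    simp only [List.foldl_cons, this]
    exact ih (fun c hcm => hd c (by simp [hcm])) _

theorem pv_takeWhile_digits (t u : List Char) (hd : ∀ c ∈ t, PySem.Chars.isdigit c = true) :
    (t ++ '.' :: u).takeWhile PySem.Chars.isdigit = t ∧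
    (t ++ '.' :: u).dropWhile PySem.Chars.isdigit = '.' :: u := by
  have htw : List.takeWhile PySem.Chars.isdigit t = t :=
    List.takeWhile_eq_self_iff.mpr hd
  have hdw : List.dropWhile PySem.Chars.isdigit t = [] := by
    rw [List.dropWhile_eq_nil_iff]; exact hd
  have hdot : PySem.Chars.isdigit '.' = false := by decide
  constructor
  · rw [List.takeWhile_append, htw]
    simp [List.takeWhile_cons, hdot]
  · rw [List.dropWhile_append, hdw]
    simp [List.dropWhile_cons, hdot]

def pvMatchP (n p : String) (i : Int) : Prop :=
  PySem.Str.startswith n ((p ++ PySem.Int.toStr i ++ ".") ++ "linear_attn.") = true ∨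
  PySem.Str.startswith n ((p ++ PySem.Int.toStr i ++ ".") ++ "conv.") = true

def pvQ (n : String) (i : Int) : Prop := ∃ p ∈ pvPrefixes, pvMatchP n p i

theorem pv_restToList (n p : String) :
    (PySem.Str.slice n (some (PySem.Str.len p)) none).toList = n.toList.drop p.toList.length := by
  simp [PySem.Str.toList_slice, PySem.Str.len_eq, PySem.List.slice_from_natCast]

theorem pv_matchP_iff (n p : String) (i : Int) :
    pvMatchP n p i ↔
      (p.toList ++ PySem.Int.toChars i ++ ".linear_attn.".toList <+: n.toList ∨
       p.toList ++ PySem.Int.toChars i ++ ".conv.".toList <+: n.toList) := by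
  unfold pvMatchP
  simp [PySem.Str.startswith_eq, PySem.Chars.startswith_iff, String.toList_append,
    PySem.Int.toList_toStr, List.append_assoc]

theorem pv_parse_iff (n p : String) (M i : Int) (hM : M ≤ 128)
    (hpre : PySem.Str.startswith n p = true) :
    pvParse n p M = some i ↔ (0 ≤ i ∧ i < M ∧ pvMatchP n p i) := by
  rw [pv_matchP_iff]
  rw [PySem.Str.startswith_eq, PySem.Chars.startswith_iff] at hpre
  have hL : n.toList = p.toList ++ n.toList.drop p.toList.length := by
    obtain ⟨r, hr⟩ := hpre
    rw [← hr, List.drop_left]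
  generalize hRdef : n.toList.drop p.toList.length = R at hL
  have hrest : (PySem.Str.slice n (some (PySem.Str.len p)) none).toList = R := by
    rw [pv_restToList n p, hRdef]
  generalize htdef : R.takeWhile PySem.Chars.isdigit = t
  have htd : ∀ c ∈ t, PySem.Chars.isdigit c = true := by
    rw [← htdef]; exact fun c hc => List.mem_takeWhile_imp hc
  have hsplit : t ++ R.dropWhile PySem.Chars.isdigit = R := by
    rw [← htdef]; exact List.takeWhile_append_dropWhile
  have hscan : pvScan (PySem.Str.slice n (some (PySem.Str.len p)) none).toList 0 0
      = (t.length, ((pvNatVal t : Nat) : Int)) := by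
    rw [hrest, pv_scan_eq, htdef, pv_foldInt_eq t htd]; simp
  have hget0 : PySem.Str.pyGet? (PySem.Str.slice n (some (PySem.Str.len p)) none) 0 = R[0]? := by
    have h0 : (0 : Int) = ((0 : Nat) : Int) := rfl
    rw [h0, PySem.Str.pyGet?_natCast, hrest]
  have htail : ∀ K : String, PySem.Str.startswith (PySem.Str.slice
        (PySem.Str.slice n (some (PySem.Str.len p)) none)
        (some ((t.length : Nat) : Int)) none) K = true ↔ K.toList <+: R.drop t.length := by
    intro K
    rw [PySem.Str.startswith_eq, PySem.Chars.startswith_iff]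
    have h2 : (PySem.Str.slice (PySem.Str.slice n (some (PySem.Str.len p)) none)
        (some ((t.length : Nat) : Int)) none).toList = R.drop t.length := by
      rw [PySem.Str.toList_slice, hrest, PySem.Chars.slice_eq_listSlice,
        PySem.List.slice_from_natCast]
    rw [h2]
  have hparse : pvParse n p M =
      (if t.length = 0 ∨ (R[0]? = some '0' ∧ 1 < t.length) then none
       else if ((pvNatVal t : Nat) : Int) < M ∧
           ((".linear_attn.".toList <+: R.drop t.length) ∨ (".conv.".toList <+: R.drop t.length))
         then some ((pvNatVal t : Nat) : Int) else none) := by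
    unfold pvParse
    simp only [hscan, hget0, htail]
  rw [hparse]; clear hparse hscan hget0 htail hrest
  have hdropk : R.drop t.length = R.dropWhile PySem.Chars.isdigit := by
    conv_lhs => rw [← hsplit]
    rw [List.drop_left]
  constructor
  · -- accept → match
    intro hacc
    split_ifs at hacc with h1 h2
    obtain ⟨hlt, hkind⟩ := h2
    injection hacc with hi
    push_neg at h1
    obtain ⟨hk0, hhead⟩ := h1
    have htne : t ≠ [] := fun h => hk0 (by rw [h]; rfl)
    have hgood : pvGood t := by
      refine ⟨htne, htd, ?_⟩
      obtain ⟨c, t', hct⟩ := List.exists_cons_of_ne_nil htne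
      by_cases hc : c = '0'
      · right
        have hR0 : R[0]? = some '0' := by
          rw [← hsplit, hct, hc]; rfl
        have h3 := hhead hR0
        rw [hct] at h3 ⊢
        simp at h3 ⊢
        omega
      · left; rw [hct]; simpa using hc
    have hvlt : pvNatVal t < 128 := by
      have : ((pvNatVal t : Nat) : Int) < 128 := lt_of_lt_of_le hlt hM
      exact_mod_cast this
    have hcanon : t = PySem.Int.toChars ((pvNatVal t : Nat) : Int) := pv_canon t hgood hvlt
    refine ⟨by rw [← hi]; positivity, by rw [← hi]; exact hlt, ?_⟩
    have hpref : ∀ K : List Char, K <+: R.drop t.length →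
        p.toList ++ PySem.Int.toChars i ++ K <+: n.toList := by
      intro K hK
      rw [hL, ← hi, ← hcanon, List.append_assoc]
      rw [List.prefix_append_right_inj]
      obtain ⟨w, hw⟩ := hK
      refine ⟨w, ?_⟩
      rw [List.append_assoc, hw, hdropk, hsplit]
    rcases hkind with hk | hk
    · exact Or.inl (hpref _ hk)
    · exact Or.inr (hpref _ hk)
  · -- match → accept
    rintro ⟨hi0, hiM, hmatch⟩
    have hv128 : i.toNat < 128 := by omega
    obtain ⟨hgood, hval⟩ := pv_toChars_good i.toNat hv128
    have hcast : ((i.toNat : Nat) : Int) = i := Int.toNat_of_nonneg hi0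
    rw [hcast] at hgood hval
    have hkey : ∀ K' : List Char, PySem.Int.toChars i ++ '.' :: K' <+: R →
        t = PySem.Int.toChars i ∧ R.dropWhile PySem.Chars.isdigit = '.' :: (R.drop ((PySem.Int.toChars i).length + 1)) ∧
          K' <+: R.drop ((PySem.Int.toChars i).length + 1) := by
      intro K' hK
      obtain ⟨w, hw⟩ := hK
      have hRform : R = PySem.Int.toChars i ++ '.' :: (K' ++ w) := by
        rw [← hw]; simp
      have htw := pv_takeWhile_digits (PySem.Int.toChars i) (K' ++ w) hgood.2.1
      have hdropform : R.drop ((PySem.Int.toChars i).length + 1) = K' ++ w := by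
        rw [hRform]
        rw [show (PySem.Int.toChars i).length + 1 = ((PySem.Int.toChars i) ++ ['.']).length by simp]
        rw [show PySem.Int.toChars i ++ '.' :: (K' ++ w) = ((PySem.Int.toChars i) ++ ['.']) ++ (K' ++ w) by simp]
        rw [List.drop_left]
      refine ⟨?_, ?_, ?_⟩
      · rw [← htdef, hRform]; exact htw.1
      · rw [hdropform, hRform, htw.2]
      · rw [hdropform]; exact ⟨w, rfl⟩
    have hfinish : ∀ (Kl K' : List Char), Kl = '.' :: K' →
        (Kl <+: R.drop t.length →
          (".linear_attn.".toList <+: R.drop t.length ∨ ".conv.".toList <+: R.drop t.length)) →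
        p.toList ++ PySem.Int.toChars i ++ Kl <+: n.toList →
        (if t.length = 0 ∨ (R[0]? = some '0' ∧ 1 < t.length) then none
         else if ((pvNatVal t : Nat) : Int) < M ∧
             (".linear_attn.".toList <+: R.drop t.length ∨ ".conv.".toList <+: R.drop t.length)
           then some ((pvNatVal t : Nat) : Int) else none) = some i := by
      intro Kl K' hKl hOr hm
      rw [hL, List.append_assoc] at hm
      have hK := (List.prefix_append_right_inj _).mp hm
      rw [hKl] at hK
      obtain ⟨ht_eq, hdw, hK'⟩ := hkey K' hK
      have hlen : t.length ≠ 0 := by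
        rw [ht_eq]
        simpa [List.length_eq_zero_iff] using hgood.1
      have hdropt : R.drop t.length = '.' :: R.drop ((PySem.Int.toChars i).length + 1) := by
        rw [hdropk, hdw]
      have hKpref : Kl <+: R.drop t.length := by
        rw [hdropt, hKl]
        exact List.cons_prefix_cons.mpr ⟨rfl, hK'⟩
      have hc1 : ¬(t.length = 0 ∨ (R[0]? = some '0' ∧ 1 < t.length)) := by
        rintro (h | ⟨hh, hl⟩)
        · exact hlen h
        · have htne2 : t ≠ [] := fun h => hlen (by rw [h]; rfl)
          obtain ⟨c, t', hct⟩ := List.exists_cons_of_ne_nil htne2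
          have hR0 : R[0]? = some c := by
            rw [← hsplit, hct]; rfl
          rw [hR0] at hh
          injection hh with hh
          rcases hgood.2.2 with hne | hone
          · exact hne (by rw [← ht_eq, hct, hh]; rfl)
          · rw [← ht_eq] at hone
            rw [hone] at hl
            exact absurd hl (by omega)
      rw [if_neg hc1, if_pos ⟨by rw [ht_eq, hval, hcast]; exact hiM, hOr hKpref⟩,
        ht_eq, hval, hcast]
    rcases hmatch with hm | hm
    · exact hfinish ".linear_attn.".toList "linear_attn.".toList (by decide) Or.inl hm
    · exact hfinish ".conv.".toList "conv.".toList (by decide) Or.inr hm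

theorem pv_matchP_startswith (n p : String) (i : Int) (h : pvMatchP n p i) :
    PySem.Str.startswith n p = true := by
  rw [pv_matchP_iff] at h
  rw [PySem.Str.startswith_eq, PySem.Chars.startswith_iff]
  rcases h with h | h <;>
    exact (List.prefix_append _ _).trans (by rwa [List.append_assoc] at h)

theorem pv_not_both (n a b : String)
    (hab : ¬ (a.toList <+: b.toList) ∧ ¬ (b.toList <+: a.toList))
    (h1 : PySem.Str.startswith n a = true) (h2 : PySem.Str.startswith n b = true) : False := by
  rw [PySem.Str.startswith_eq, PySem.Chars.startswith_iff] at h1 h2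
  exact (List.prefix_or_prefix_of_prefix h1 h2).elim hab.1 hab.2

theorem pv_loop_cons (n : String) (M : Int) (p : String) (ps : List String) :
    pvLayerIndexLoop n M (p :: ps) =
      if PySem.Str.startswith n p then pvParse n p M else pvLayerIndexLoop n M ps := rfl

theorem pv_loop_iff (n : String) (M i : Int) (hM : M ≤ 128) :
    pvLayerIndexLoop n M pvPrefixes = some i ↔ (0 ≤ i ∧ i < M ∧ pvQ n i) := by
  have hloop : pvLayerIndexLoop n M pvPrefixes =
      (if PySem.Str.startswith n "model.layers." then pvParse n "model.layers." M
       else if PySem.Str.startswith n "model.language_model.layers." then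
         pvParse n "model.language_model.layers." M
       else if PySem.Str.startswith n "language_model.model.layers." then
         pvParse n "language_model.model.layers." M
       else none) := by
    show pvLayerIndexLoop n M ("model.layers." :: "model.language_model.layers." ::
      "language_model.model.layers." :: []) = _
    rw [pv_loop_cons, pv_loop_cons, pv_loop_cons]
    rfl
  constructor
  · intro h
    rw [hloop] at h
    show 0 ≤ i ∧ i < M ∧ ∃ p ∈ pvPrefixes, pvMatchP n p i
    split_ifs at h with h1 h2 h3
    · obtain ⟨a, b, c⟩ := (pv_parse_iff n _ M i hM h1).mp h
      exact ⟨a, b, _, by simp [pvPrefixes], c⟩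
    · obtain ⟨a, b, c⟩ := (pv_parse_iff n _ M i hM h2).mp h
      exact ⟨a, b, _, by simp [pvPrefixes], c⟩
    · obtain ⟨a, b, c⟩ := (pv_parse_iff n _ M i hM h3).mp h
      exact ⟨a, b, _, by simp [pvPrefixes], c⟩
  · rintro ⟨h0, hMi, p₀, hp₀, hm⟩
    have hsw := pv_matchP_startswith n p₀ i hm
    rw [hloop]
    simp only [pvPrefixes, List.mem_cons, List.not_mem_nil, or_false] at hp₀
    rcases hp₀ with rfl | rfl | rfl
    · rw [if_pos hsw]
      exact (pv_parse_iff n _ M i hM hsw).mpr ⟨h0, hMi, hm⟩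
    · have h1 : ¬ PySem.Str.startswith n "model.layers." = true := fun hc =>
        pv_not_both n _ _ (by decide) hc hsw
      rw [if_neg h1, if_pos hsw]
      exact (pv_parse_iff n _ M i hM hsw).mpr ⟨h0, hMi, hm⟩
    · have h1 : ¬ PySem.Str.startswith n "model.layers." = true := fun hc =>
        pv_not_both n _ _ (by decide) hc hsw
      have h2 : ¬ PySem.Str.startswith n "model.language_model.layers." = true := fun hc =>
        pv_not_both n _ _ (by decide) hc hsw
      rw [if_neg h1, if_neg h2, if_pos hsw]
      exact (pv_parse_iff n _ M i hM hsw).mpr ⟨h0, hMi, hm⟩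

theorem pv_pickALoop_eq (names : List String) (is : List Int) :
    pvPickALoop names is =
      match is.find? (fun i => pvPrefixes.any (fun p => pvCondA names (p ++ PySem.Int.toStr i ++ "."))) with
      | some i => i
      | none => 0 := by
  induction is with
  | nil => rfl
  | cons i is ih =>
    show (if pvPrefixes.any (fun p => pvCondA names (p ++ PySem.Int.toStr i ++ ".")) then i
      else pvPickALoop names is) = _
    rw [List.find?_cons]
    by_cases h : pvPrefixes.any (fun p => pvCondA names (p ++ PySem.Int.toStr i ++ ".")) = true
    · rw [h]; simp
    · rw [Bool.eq_false_iff.mpr h]; simp only [Bool.false_eq_true, if_false]; exact ih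

theorem pv_condA_iff (names : List String) (i : Int) :
    (pvPrefixes.any (fun p => pvCondA names (p ++ PySem.Int.toStr i ++ ".")) = true) ↔
    ∃ n ∈ names, pvQ n i := by
  unfold pvCondA pvQ pvMatchP
  simp only [List.any_eq_true, Bool.or_eq_true]
  constructor
  · rintro ⟨p, hp, n, hn, h⟩; exact ⟨n, hn, p, hp, h⟩
  · rintro ⟨n, hn, p, hp, h⟩; exact ⟨p, hp, n, hn, h⟩

theorem pv_find_range_none (a b : Int) (p : Int → Bool)
    (h : ∀ j, a ≤ j → j < b → p j = false) :
    (PySem.List.pyRange a b 1).find? p = none := by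
  by_cases hab : b ≤ a
  · rw [PySem.List.pyRange_one_eq_nil hab]; rfl
  · push_neg at hab
    rw [PySem.List.pyRange_one_cons hab, List.find?_cons, h a le_rfl hab]
    exact pv_find_range_none (a + 1) b p (fun j hj1 hj2 => h j (by omega) hj2)
termination_by (b - a).toNat
decreasing_by omega

theorem pv_find_range_some (a b i₀ : Int) (p : Int → Bool)
    (ha : a ≤ i₀) (hb : i₀ < b) (hp : p i₀ = true)
    (hmin : ∀ j, a ≤ j → j < i₀ → p j = false) :
    (PySem.List.pyRange a b 1).find? p = some i₀ := by
  have hab : a < b := lt_of_le_of_lt ha hb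
  rw [PySem.List.pyRange_one_cons hab, List.find?_cons]
  by_cases hai : a = i₀
  · subst hai; rw [hp]
  · rw [hmin a le_rfl (by omega)]
    exact pv_find_range_some (a + 1) b i₀ p (by omega) hb hp
      (fun j hj1 hj2 => hmin j (by omega) hj2)
termination_by (b - a).toNat
decreasing_by omega

theorem pv_min_shift (acc : Option Int) (v : Int) (vs : List Int) :
    ((match acc with
      | none => some v
      | some b => if v < b then some v else some b).toList ++ vs).min? =
    (acc.toList ++ v :: vs).min? := by
  cases acc with
  | none => rfl
  | some b =>
    show ((if v < b then some v else some b).toList ++ vs).min? = _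
    have h1 : (if v < b then some v else some b) = some (min b v) := by
      rcases lt_or_ge v b with h | h
      · rw [if_pos h, min_eq_right (le_of_lt h)]
      · rw [if_neg (by omega), min_eq_left h]
    rw [h1]
    show ((min b v) :: vs).min? = (b :: v :: vs).min?
    simp [List.min?]

theorem pv_foldl_min (f : String → Option Int) (l : List String) : ∀ acc : Option Int,
    l.foldl (fun best n =>
      match f n with
      | some idx =>
        match best with
        | none => some idx
        | some b => if idx < b then some idx else some b
      | none => best) acc = (acc.toList ++ l.filterMap f).min? := by
  induction l with
  | nil => intro acc; cases acc <;> simp [List.min?]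
  | cons n l ih =>
    intro acc
    rw [List.foldl_cons, List.filterMap_cons]
    cases hf : f n with
    | none => exact ih acc
    | some v =>
      rw [ih, ← pv_min_shift acc v (l.filterMap f)]

theorem pv_main (names : List String) (layer_types : List Int) :
    pick_recurrent_layer_index names layer_types = pick_recurrent_layer_index_alt names layer_types := by
  unfold pick_recurrent_layer_index pick_recurrent_layer_index_alt
  by_cases hemp : layer_types.isEmpty
  · rw [if_pos hemp, if_pos hemp]
  · rw [if_neg hemp, if_neg hemp]
    dsimp only
    have hM : min (PySem.List.len layer_types) 128 ≤ 128 := min_le_right _ _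
    generalize hMdef : min (PySem.List.len layer_types) 128 = M at hM
    rw [pv_pickALoop_eq, pv_foldl_min (fun n => pvLayerIndexLoop n M pvPrefixes) names none]
    have hmem : ∀ i : Int, i ∈ names.filterMap (fun n => pvLayerIndexLoop n M pvPrefixes) ↔
        (0 ≤ i ∧ i < M ∧ ∃ n ∈ names, pvQ n i) := by
      intro i
      rw [List.mem_filterMap]
      constructor
      · rintro ⟨n, hn, h⟩
        obtain ⟨a, b, c⟩ := (pv_loop_iff n M i hM).mp h
        exact ⟨a, b, n, hn, c⟩
      · rintro ⟨a, b, n, hn, c⟩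
        exact ⟨n, hn, (pv_loop_iff n M i hM).mpr ⟨a, b, c⟩⟩
    by_cases hT : ∃ i : Int, 0 ≤ i ∧ i < M ∧ ∃ n ∈ names, pvQ n i
    · obtain ⟨i₀, hTi₀, hleast⟩ := Int.exists_least_of_bdd
        (P := fun i => 0 ≤ i ∧ i < M ∧ ∃ n ∈ names, pvQ n i) ⟨0, fun z hz => hz.1⟩ hT
      have hfind : (PySem.List.pyRange 0 M 1).find?
          (fun i => pvPrefixes.any (fun p => pvCondA names (p ++ PySem.Int.toStr i ++ "."))) = some i₀ := by
        apply pv_find_range_some 0 M i₀ _ hTi₀.1 hTi₀.2.1 ((pv_condA_iff names i₀).mpr hTi₀.2.2)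
        intro j hj0 hji
        rw [Bool.eq_false_iff]
        intro hc
        have hTj : 0 ≤ j ∧ j < M ∧ ∃ n ∈ names, pvQ n j :=
          ⟨hj0, by omega, (pv_condA_iff names j).mp hc⟩
        exact absurd (hleast j hTj) (by omega)
      have hmin : ((none : Option Int).toList ++ names.filterMap (fun n => pvLayerIndexLoop n M pvPrefixes)).min? = some i₀ := by
        rw [Option.toList_none, List.nil_append, List.min?_eq_some_iff]
        exact ⟨(hmem i₀).mpr hTi₀, fun b hb => hleast b ((hmem b).mp hb)⟩
      rw [hfind, hmin]
    · have hfind : (PySem.List.pyRange 0 M 1).find?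
          (fun i => pvPrefixes.any (fun p => pvCondA names (p ++ PySem.Int.toStr i ++ "."))) = none := by
        apply pv_find_range_none
        intro j hj0 hjM
        rw [Bool.eq_false_iff]
        intro hc
        exact hT ⟨j, hj0, hjM, (pv_condA_iff names j).mp hc⟩
      have hnil : names.filterMap (fun n => pvLayerIndexLoop n M pvPrefixes) = [] := by
        rw [List.eq_nil_iff_forall_not_mem]
        intro i hi
        exact hT ⟨i, (hmem i).mp hi⟩
      rw [hfind, hnil]
      rfl

-- ===== VERDICT (by name: the statement is the Claim_ definition above) =====
theorem pick_recurrent_layer_index_spec : Claim_equal_pick_recurrent_layer_index := by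
  intro names layer_types _
  exact pv_main names layer_types
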